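-- pv_equiv track=rewrite | github.com/IvanCaceresS/ColonyDynamicsSimulator | client_app/main.py | split_braces_outside_strings
-- ===== SOURCE A (Python) =====
-- def split_braces_outside_strings(code: str) -> str:
--     result_lines = []
--     in_string = False
--     escape_next = False
--     for line in code.splitlines(keepends=True):
--         new_line_chars = []
--         i = 0
--         while i < len(line):
--             ch = line[i]
--             if escape_next:
--                 new_line_chars.append(ch)
--                 escape_next = False
--             elif ch == '\\':
--                 new_line_chars.append(ch)
--                 escape_next = True
--             elif ch == '"':
--                 in_string = not in_string
--                 new_line_chars.append(ch)
--             elif ch == '{' and not in_string: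
--                 prefix = '\n' if not ''.join(new_line_chars).endswith(('\n', ' ', '\t', '{')) else ''
--                 suffix = '\n' if i + 1 < len(line) and line[i+1] != '\n' else ''
--                 new_line_chars.append(f"{prefix}{{{suffix}")
--             elif ch == '}' and not in_string:
--                 prefix = '\n' if not ''.join(new_line_chars).endswith(('\n', ' ', '\t', '{')) else ''
--                 suffix = '\n' if i + 1 < len(line) and line[i+1] != '\n' else ''
--                 new_line_chars.append(f"{prefix}}}{suffix}")
--             else:
--                 new_line_chars.append(ch)
--             i += 1
--         result_lines.append(''.join(new_line_chars))
--     return ''.join(result_lines)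
-- ===== SOURCE B (Python) =====
-- def split_braces_outside_strings(code: str) -> str:
--     # Phase 1: one pass of the quote/escape state machine over the whole code,
--     # marking positions that are braces outside string literals.
--     mask = []
--     in_string = False
--     escape = False
--     for ch in code:
--         if escape:
--             mask.append(False)
--             escape = False
--         elif ch == '\\':
--             mask.append(False)
--             escape = True
--         elif ch == '"':
--             in_string = not in_string
--             mask.append(False)
--         elif ch in '{}' and not in_string:
--             mask.append(True)
--         else:
--             mask.append(False)
--     # Phase 2: rebuild per line, consulting the mask; track only the last
--     # emitted character of the current line (None at line start).
--     out = []
--     pos = 0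
--     for line in code.splitlines(keepends=True):
--         last = None
--         for j, ch in enumerate(line):
--             if mask[pos]:
--                 pre = '' if last in ('\n', ' ', '\t', '{') else '\n'
--                 suf = '\n' if j + 1 < len(line) and line[j + 1] != '\n' else ''
--                 out.append(pre + ch + suf)
--                 last = '\n' if suf else ch
--             else:
--                 out.append(ch)
--                 last = ch
--             pos += 1
--     return ''.join(out)
-- ===== Notes on version B (the rewrite author's own statement) =====
-- stated objective: alternative
-- what changed: A's single interleaved scan that re-joins the accumulated line buffer at every brace is replaced by a mask-building pass over the whole code (quote/escape state machine marking braces outside strings) plus a per-line emit pass that consults the mask and tracks only the last emitted character; intended as faster, measured ~1.5x (not consistently above the threshold).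
import Mathlib
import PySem

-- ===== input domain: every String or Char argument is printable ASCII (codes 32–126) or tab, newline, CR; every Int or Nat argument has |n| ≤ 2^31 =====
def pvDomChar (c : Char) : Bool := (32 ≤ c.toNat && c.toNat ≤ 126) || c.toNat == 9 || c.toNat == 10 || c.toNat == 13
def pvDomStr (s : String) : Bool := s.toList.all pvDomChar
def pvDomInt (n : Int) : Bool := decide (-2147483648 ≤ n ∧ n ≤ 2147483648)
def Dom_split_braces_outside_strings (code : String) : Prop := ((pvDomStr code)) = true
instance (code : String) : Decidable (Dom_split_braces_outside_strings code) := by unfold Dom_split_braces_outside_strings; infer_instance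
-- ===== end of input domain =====

-- B replaces A's single interleaved scan (which re-joins the line buffer at every brace) by a
-- whole-code mask-building pass plus a per-line emit pass that tracks only the last emitted char
-- (intended as faster; a timing run measured ~1.5x at the largest size, not consistently more).

-- shared helper: code.splitlines(keepends=True); exact for '\n', '\r', '\r\n'
-- (the only line breaks in the ASCII+tab/newline/CR input domain)
def pySplitKeepends (acc : List Char) : List Char → List (List Char)
  | [] => if acc.isEmpty then [] else [acc.reverse]
  | c :: rest =>
    if c = '\n' then (acc.reverse ++ ['\n']) :: pySplitKeepends [] rest
    else if c = '\r' then
      if rest.headD ' ' = '\n' then (acc.reverse ++ ['\r', '\n']) :: pySplitKeepends [] rest.tail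
      else (acc.reverse ++ ['\r']) :: pySplitKeepends [] rest
    else pySplitKeepends (c :: acc) rest
termination_by l => l.length
decreasing_by all_goals simp [List.length_tail]

-- ===== PORT A =====
-- ''.join(new_line_chars).endswith(('\n',' ','\t','{')) — exact: a 1-char-suffix endswith is a last-char test
def endsOkA (acc : List Char) : Bool :=
  match acc.getLast? with
  | some c => c = '\n' || c = ' ' || c = '\t' || c = '{'
  | none => false

-- the while-loop over one line: state (in_string, escape), acc = new_line_chars (joined);
-- line[i+1] is the head of the remaining chars
def procLineA : List Char → Bool → Bool → List Char → List Char × Bool × Bool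
  | [], ins, esc, acc => (acc, ins, esc)
  | ch :: rest, ins, esc, acc =>
    if esc then procLineA rest ins false (acc ++ [ch])
    else if ch = '\\' then procLineA rest ins true (acc ++ [ch])
    else if ch = '"' then procLineA rest (!ins) esc (acc ++ [ch])
    else if ch = '{' && !ins then
      let pre : List Char := if endsOkA acc then [] else ['\n']
      let suf : List Char := match rest with
        | c :: _ => if c ≠ '\n' then ['\n'] else []
        | [] => []
      procLineA rest ins esc (acc ++ (pre ++ [ch] ++ suf))
    else if ch = '}' && !ins then
      let pre : List Char := if endsOkA acc then [] else ['\n']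
      let suf : List Char := match rest with
        | c :: _ => if c ≠ '\n' then ['\n'] else []
        | [] => []
      procLineA rest ins esc (acc ++ (pre ++ [ch] ++ suf))
    else procLineA rest ins esc (acc ++ [ch])

-- the for-loop over the lines; ''.join(result_lines) = concatenation
def procLinesA : List (List Char) → Bool → Bool → List Char
  | [], _, _ => []
  | l :: ls, ins, esc =>
    match procLineA l ins esc [] with
    | (out, ins', esc') => out ++ procLinesA ls ins' esc'

def split_braces_outside_strings (code : String) : String :=
  String.mk (procLinesA (pySplitKeepends [] code.toList) false false)

-- ===== PORT B =====
-- phase 1 step: same quote/escape machine; returns (new state, mask bit)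
def maskStep (s : Bool × Bool) (ch : Char) : (Bool × Bool) × Bool :=
  if s.2 then ((s.1, false), false)
  else if ch = '\\' then ((s.1, true), false)
  else if ch = '"' then ((!s.1, s.2), false)
  else if (ch = '{' || ch = '}') && !s.1 then (s, true)
  else (s, false)

def maskList : List Char → (Bool × Bool) → List Bool × (Bool × Bool)
  | [], s => ([], s)
  | c :: rest, s =>
    match maskStep s c with
    | (s', b) =>
      match maskList rest s' with
      | (m, sf) => (b :: m, sf)

-- phase 2, one line: consume the line's chars and the mask in step; `last` is the
-- last emitted char of this line (none at line start); returns (output, leftover mask)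
def emitLine : List Char → List Bool → Option Char → List Char × List Bool
  | [], m, _ => ([], m)
  | ch :: rest, m, last =>
    let b := m.headD false
    let m' := m.tail
    if b then
      let pre : List Char :=
        if last = some '\n' || last = some ' ' || last = some '\t' || last = some '{' then []
        else ['\n']
      let suf : List Char := match rest with
        | c :: _ => if c ≠ '\n' then ['\n'] else []
        | [] => []
      let last' : Option Char := if suf.isEmpty then some ch else some '\n'
      match emitLine rest m' last' with
      | (out, mrest) => (pre ++ ch :: (suf ++ out), mrest)
    else
      match emitLine rest m' (some ch) with
      | (out, mrest) => (ch :: out, mrest)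

def emitLines : List (List Char) → List Bool → List Char
  | [], _ => []
  | l :: ls, m =>
    match emitLine l m none with
    | (out, m') => out ++ emitLines ls m'

def split_braces_outside_strings_alt (code : String) : String :=
  let cs := code.toList
  String.mk (emitLines (pySplitKeepends [] cs) (maskList cs (false, false)).1)

-- ===== PRECONDITION & SPEC =====
def Spec_split_braces_outside_strings (code : String) (out : String) : Prop := out = split_braces_outside_strings_alt code
instance (code : String) (out : String) : Decidable (Spec_split_braces_outside_strings code out) := by unfold Spec_split_braces_outside_strings; infer_instance

-- ===== CLAIM (what is proved, stated in full; the proofs are below) =====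
def Claim_equal_split_braces_outside_strings : Prop := ∀ (code : String), Dom_split_braces_outside_strings code → Spec_split_braces_outside_strings code (split_braces_outside_strings code)

-- ===== LEMMAS AND PROOFS =====

theorem flatten_pySplitKeepends (acc cs : List Char) : (pySplitKeepends acc cs).flatten = acc.reverse ++ cs := by
  fun_induction pySplitKeepends acc cs
  case case4 a r hhead hne ih => cases r <;> simp_all
  all_goals simp_all [List.isEmpty_iff]

theorem maskList_append (a b : List Char) (s : Bool × Bool) :
    maskList (a ++ b) s =
      ((maskList a s).1 ++ (maskList b (maskList a s).2).1, (maskList b (maskList a s).2).2) := by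
  induction a generalizing s with
  | nil => simp [maskList]
  | cons c rest ih => simp [maskList, ih]
theorem procLineA_eq_emitLine (l : List Char) :
    ∀ (ins esc : Bool) (acc : List Char) (mrest : List Bool),
      procLineA l ins esc acc =
        (acc ++ (emitLine l ((maskList l (ins, esc)).1 ++ mrest) acc.getLast?).1,
          (maskList l (ins, esc)).2)
      ∧ (emitLine l ((maskList l (ins, esc)).1 ++ mrest) acc.getLast?).2 = mrest := by
  induction l with
  | nil => intro ins esc acc mrest; simp [procLineA, maskList, emitLine]
  | cons ch rest ih =>
    intro ins esc acc mrest
    by_cases hesc : esc = true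
    · have h1 := ih ins false (acc ++ [ch]) mrest
      simp only [procLineA, maskList, maskStep, emitLine, hesc, if_true] at *
      simp_all
    · simp only [Bool.not_eq_true] at hesc
      by_cases hbs : ch = '\\'
      · have h1 := ih ins true (acc ++ [ch]) mrest
        simp only [procLineA, maskList, maskStep, emitLine, hesc, hbs] at *
        simp_all
      · by_cases hq : ch = '"'
        · have h1 := ih (!ins) esc (acc ++ [ch]) mrest
          simp only [procLineA, maskList, maskStep, emitLine, hesc, hbs, hq] at *
          simp_all
        · by_cases hbr : (ch = '{' ∨ ch = '}') ∧ ins = false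
          · -- brace outside string
            obtain ⟨hb, hins⟩ := hbr
            simp only [procLineA, maskList, maskStep, emitLine, hesc, hbs, hq, hins] at *
            have hpre : (decide (acc.getLast? = some '\n') || decide (acc.getLast? = some ' ') ||
                decide (acc.getLast? = some '\t') || decide (acc.getLast? = some '{')) = endsOkA acc := by
              cases hl : acc.getLast? <;> simp [endsOkA, hl]
            rcases hb with hb | hb <;> subst hb
            · simp only [Bool.false_eq_true, reduceIte, List.headD_cons, List.tail_cons]
              rw [hpre]
              cases rest with
              | nil =>
                simp [maskList, emitLine, procLineA]
              | cons c t =>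
                by_cases hc : c = '\n'
                · subst hc
                  have h1 := ih false false (acc ++ ((if endsOkA acc = true then [] else ['\n']) ++ ['{'])) mrest
                  simp only [List.getLast?_append] at h1
                  simp_all [List.append_assoc, maskList, emitLine]
                · have h1 := ih false false (acc ++ ((if endsOkA acc = true then [] else ['\n']) ++ ['{'] ++ ['\n'])) mrest
                  simp only [List.getLast?_append] at h1
                  simp_all [List.append_assoc, maskList, emitLine]
            · simp only [Bool.false_eq_true, reduceIte, List.headD_cons, List.tail_cons]
              rw [hpre]
              cases rest with
              | nil =>
                simp [maskList, emitLine, procLineA]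
              | cons c t =>
                by_cases hc : c = '\n'
                · subst hc
                  have h1 := ih false false (acc ++ ((if endsOkA acc = true then [] else ['\n']) ++ ['}'])) mrest
                  simp only [List.getLast?_append] at h1
                  simp_all [List.append_assoc, maskList, emitLine]
                · have h1 := ih false false (acc ++ ((if endsOkA acc = true then [] else ['\n']) ++ ['}'] ++ ['\n'])) mrest
                  simp only [List.getLast?_append] at h1
                  simp_all [List.append_assoc, maskList, emitLine]
          · -- other char (or brace inside string): mask bit false
            have hc : ((decide (ch = '{') || decide (ch = '}')) && !ins) = false := by
              cases ins <;> simp_all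
            have hc1 : (decide (ch = '{') && !ins) = false := by
              cases ins <;> simp_all
            have hc2 : (decide (ch = '}') && !ins) = false := by
              cases ins <;> simp_all
            have h1 := ih ins esc (acc ++ [ch]) mrest
            simp only [procLineA, maskList, maskStep, emitLine, hesc, hbs, hq, hc, hc1, hc2,
              Bool.false_eq_true, reduceIte, List.headD_cons, List.tail_cons] at *
            simp_all

theorem procLinesA_eq_emitLines (ls : List (List Char)) :
    ∀ (ins esc : Bool) (mrest : List Bool),
      procLinesA ls ins esc = emitLines ls ((maskList ls.flatten (ins, esc)).1 ++ mrest) := by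
  induction ls with
  | nil => intro _ _ _; simp [procLinesA, emitLines]
  | cons l ls ih =>
    intro ins esc mrest
    have hkey := procLineA_eq_emitLine l ins esc []
      ((maskList ls.flatten (maskList l (ins, esc)).2).1 ++ mrest)
    simp only [List.getLast?_nil] at hkey
    simp only [procLinesA, emitLines, List.flatten_cons, maskList_append, List.append_assoc]
    rw [hkey.1]
    simp only [hkey.2, List.nil_append]
    rw [ih _ _ mrest]

-- ===== VERDICT (by name: the statement is the Claim_ definition above) =====
theorem split_braces_outside_strings_spec : Claim_equal_split_braces_outside_strings := by
  intro code _
  unfold Spec_split_braces_outside_strings split_braces_outside_strings split_braces_outside_strings_alt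
  have h := procLinesA_eq_emitLines (pySplitKeepends [] code.toList) false false []
  rw [flatten_pySplitKeepends] at h
  simp only [List.reverse_nil, List.nil_append, List.append_nil] at h
  exact congrArg String.mk h
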